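-- pv_equiv track=rewrite | github.com/GMPavanLab/StrDynRel | functions.py | add_properties
-- ===== SOURCE A (Python) =====
-- def add_properties(prop_dict):
--     prop = {"name" : [p[0] for p in prop_dict["Properties"]],\
--             "type" : [p[1] for p in prop_dict["Properties"]],\
--             "col" : [p[2] for p in prop_dict["Properties"]]}
--
--     properties_l = list()
--     for p in range(len(prop["name"])):
--         properties_l.append(str(prop["name"][p])+\
--                         ":"+str(prop["type"][p])+\
--                         ":"+str(prop["col"][p]))
--     return properties_l
-- ===== SOURCE B (Python) =====
-- def add_properties(prop_dict):
--     return [str(p[0]) + ":" + str(p[1]) + ":" + str(p[2])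
--             for p in prop_dict["Properties"]]
-- ===== Notes on version B (the rewrite author's own statement) =====
-- stated objective: simpler
-- what changed: B drops the intermediate dict of three parallel column lists and the index loop over range(len(...)), producing each output string directly from the row tuple in one comprehension.
import Mathlib
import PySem

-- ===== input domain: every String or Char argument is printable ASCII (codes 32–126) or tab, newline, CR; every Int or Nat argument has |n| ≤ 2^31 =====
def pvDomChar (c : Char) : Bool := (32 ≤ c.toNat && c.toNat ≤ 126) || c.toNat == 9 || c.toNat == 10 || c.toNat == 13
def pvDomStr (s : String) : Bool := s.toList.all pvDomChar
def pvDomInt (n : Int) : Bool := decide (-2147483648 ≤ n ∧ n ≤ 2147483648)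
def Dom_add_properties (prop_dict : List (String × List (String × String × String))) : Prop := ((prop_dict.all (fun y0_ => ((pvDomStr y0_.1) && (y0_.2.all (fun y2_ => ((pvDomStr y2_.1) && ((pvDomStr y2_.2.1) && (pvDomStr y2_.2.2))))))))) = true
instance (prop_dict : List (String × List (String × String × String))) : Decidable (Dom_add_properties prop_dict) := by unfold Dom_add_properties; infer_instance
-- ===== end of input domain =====

-- B replaces A's transpose-into-three-column-lists-then-index-join with a single direct
-- row-wise map over the tuples (objective: simpler).

-- ===== PORT A =====
-- str() applied to a value that is already a str is the identity, so it is omitted.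
def add_properties (prop_dict : List (String × List (String × String × String))) : List String :=
  match PySem.Dict.get? (PySem.Dict.mk prop_dict) "Properties" with
  | none => []   -- KeyError in Python; excluded by Pre_
  | some props =>
    let names := props.map (fun p => p.1)
    let types := props.map (fun p => p.2.1)
    let cols  := props.map (fun p => p.2.2)
    (PySem.List.pyRange 0 (names.length : Int) 1).foldl
      (fun acc p => acc ++ [PySem.List.pyGetD names p "" ++ ":" ++
                            PySem.List.pyGetD types p "" ++ ":" ++
                            PySem.List.pyGetD cols p ""]) []

-- ===== PORT B =====
def add_properties_alt (prop_dict : List (String × List (String × String × String))) : List String :=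
  match PySem.Dict.get? (PySem.Dict.mk prop_dict) "Properties" with
  | none => []   -- KeyError in Python; excluded by Pre_
  | some props => props.map (fun p => p.1 ++ ":" ++ p.2.1 ++ ":" ++ p.2.2)

-- ===== PRECONDITION & SPEC =====
-- Pre_ excludes only the inputs on which Python A raises KeyError: no "Properties" key.
def Pre_add_properties (prop_dict : List (String × List (String × String × String))) : Prop :=
  (PySem.Dict.get? (PySem.Dict.mk prop_dict) "Properties").isSome = true
instance (prop_dict : List (String × List (String × String × String))) : Decidable (Pre_add_properties prop_dict) := by unfold Pre_add_properties; infer_instance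

def pvWitness_add_properties : (List (String × List (String × String × String))) :=
  [("Properties", [("a", "int", "1"), ("b", "float", "2")])]

def Spec_add_properties (prop_dict : List (String × List (String × String × String))) (out : List String) : Prop := out = add_properties_alt prop_dict
instance (prop_dict : List (String × List (String × String × String))) (out : List String) : Decidable (Spec_add_properties prop_dict out) := by unfold Spec_add_properties; infer_instance

-- ===== CLAIM (what is proved, stated in full; the proofs are below) =====
def Claim_equal_add_properties : Prop := ∀ (prop_dict : List (String × List (String × String × String))), Dom_add_properties prop_dict → Pre_add_properties prop_dict → Spec_add_properties prop_dict (add_properties prop_dict)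

-- ===== LEMMAS AND PROOFS =====

-- Column-indexed join of the three projected lists equals the direct row-wise map.
theorem columns_join (props : List (String × String × String)) :
    (List.range props.length).map (fun k =>
        (props.map (fun p => p.1)).getD k "" ++ ":" ++
        (props.map (fun p => p.2.1)).getD k "" ++ ":" ++
        (props.map (fun p => p.2.2)).getD k "") =
    props.map (fun p => p.1 ++ ":" ++ p.2.1 ++ ":" ++ p.2.2) := by
  induction props with
  | nil => rfl
  | cons h t ih =>
    rw [List.length_cons, List.range_succ_eq_map, List.map_cons, List.map_map]
    refine congrArg₂ _ rfl ?_
    rw [← ih]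
    exact List.map_congr_left (fun k _ => rfl)

theorem add_properties_spec : Claim_equal_add_properties := by
  intro prop_dict _ _
  unfold Spec_add_properties add_properties add_properties_alt
  cases PySem.Dict.get? (PySem.Dict.mk prop_dict) "Properties" with
  | none => rfl
  | some props =>
    simp only [PySem.List.foldl_append_singleton_eq_map, List.nil_append,
      PySem.List.pyRange_zero_natCast, List.length_map, List.map_map, Function.comp_def,
      PySem.List.pyGetD_natCast]
    exact columns_join props
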